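-- pv_equiv track=rewrite | github.com/AjaySP04/testing | decimal_to_binary.py | get_bits_in_list
-- ===== SOURCE A (Python) =====
-- def get_bits_in_list(num):
--     """ Convert a decimal number into a list of binary bits."""
--     list_of_bits = list()
--     while True:
--         rem = num % 2
--         list_of_bits.append(rem)
--         num = int(num / 2)
--         if num == 0:
--             break
--     return list_of_bits[::-1]
-- ===== SOURCE B (Python) =====
-- def get_bits_in_list(num):
--     """ Convert a decimal number into a list of binary bits."""
--     q = int(num / 2)
--     if q == 0:
--         return [num % 2]
--     return get_bits_in_list(q) + [num % 2]
-- ===== Notes on version B (the rewrite author's own statement) =====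
-- stated objective: simpler
-- what changed: Replaced the while-loop that accumulates bits LSB-first and then reverses with a recursive function that builds the bits MSB-first directly, removing the accumulator list and the final reversing slice.
import Mathlib
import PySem

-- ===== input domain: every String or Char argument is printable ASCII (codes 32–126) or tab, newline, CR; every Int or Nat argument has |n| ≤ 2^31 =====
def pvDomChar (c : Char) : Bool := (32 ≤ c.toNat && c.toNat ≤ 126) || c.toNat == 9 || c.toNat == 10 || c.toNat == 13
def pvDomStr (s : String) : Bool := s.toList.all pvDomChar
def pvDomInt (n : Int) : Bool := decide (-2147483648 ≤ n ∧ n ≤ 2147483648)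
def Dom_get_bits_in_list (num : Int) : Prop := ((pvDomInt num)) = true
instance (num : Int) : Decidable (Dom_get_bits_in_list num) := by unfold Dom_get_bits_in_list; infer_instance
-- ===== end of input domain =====

-- B replaces A's LSB-first loop + reversing slice with a recursion that emits bits MSB-first (simpler: no accumulator list, no reversal).


-- termination fact cited by both ports
theorem pv_tdiv2_lt (num : Int) (h : num.tdiv 2 ≠ 0) : (num.tdiv 2).natAbs < num.natAbs := by
  have h2 : (num.tdiv 2).natAbs = num.natAbs / 2 := by
    rw [Int.natAbs_tdiv]; rfl
  omega

-- ===== PORT A =====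
-- the while-True loop of A, carrying list_of_bits; `int(num / 2)` is Int.tdiv num 2
-- (exact on Dom: |num| ≤ 2^31, so the float division num/2 is exact and int() truncates toward zero)
def get_bits_in_list_loop (num : Int) (list_of_bits : List Int) : List Int :=
  let rem := PySem.Int.mod num 2
  let list_of_bits := list_of_bits ++ [rem]
  let num' := Int.tdiv num 2
  if h : num' = 0 then list_of_bits
  else get_bits_in_list_loop num' list_of_bits
termination_by num.natAbs
decreasing_by exact pv_tdiv2_lt num h

def get_bits_in_list (num : Int) : List Int :=
  (PySem.List.slice? (get_bits_in_list_loop num []) none none (-1)).getD []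

-- ===== PORT B =====
def get_bits_in_list_alt (num : Int) : List Int :=
  let q := Int.tdiv num 2   -- int(num / 2), exact on Dom (see above)
  if h : q = 0 then [PySem.Int.mod num 2]
  else get_bits_in_list_alt q ++ [PySem.Int.mod num 2]
termination_by num.natAbs
decreasing_by exact pv_tdiv2_lt num h

-- ===== PRECONDITION & SPEC =====
def Spec_get_bits_in_list (num : Int) (out : List Int) : Prop := out = get_bits_in_list_alt num
instance (num : Int) (out : List Int) : Decidable (Spec_get_bits_in_list num out) := by unfold Spec_get_bits_in_list; infer_instance

-- ===== CLAIM (what is proved, stated in full; the proofs are below) =====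
def Claim_equal_get_bits_in_list : Prop := ∀ (num : Int), Dom_get_bits_in_list num → Spec_get_bits_in_list num (get_bits_in_list num)

-- ===== LEMMAS AND PROOFS =====

-- the loop produces, after the carried prefix, exactly the reverse of B's MSB-first bit list
theorem loop_eq_append_reverse_alt (n : Nat) :
    ∀ (num : Int) (acc : List Int), num.natAbs = n →
      get_bits_in_list_loop num acc = acc ++ (get_bits_in_list_alt num).reverse := by
  induction n using Nat.strong_induction_on with
  | _ n ih =>
    intro num acc hn
    rw [get_bits_in_list_loop, get_bits_in_list_alt]
    by_cases h : Int.tdiv num 2 = 0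
    · simp [h]
    · simp only [h, dite_false]
      rw [ih (Int.tdiv num 2).natAbs (hn ▸ pv_tdiv2_lt num h) _ _ rfl]
      simp

-- ===== VERDICT (by name: the statement is the Claim_ definition above) =====
theorem get_bits_in_list_spec : Claim_equal_get_bits_in_list := by
  intro num _
  unfold Spec_get_bits_in_list get_bits_in_list
  rw [loop_eq_append_reverse_alt num.natAbs num [] rfl]
  simp [PySem.List.slice?_none_none_neg_one]
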